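-- pv_equiv track=rewrite | github.com/davisarthur/Kattis | wff.py | process
-- ===== SOURCE A (Python) =====
-- def process(s):
--     ops1 = []
--     ops2 = []
--     logical_vars = []
--     for i in range(len(s)):
--         if s[i] == 'N':
--             ops1.append(s[i])
--         elif s[i] == 'K' or s[i] == 'A' or s[i] == 'C' or s[i] == 'E':
--             ops2.append(s[i])
--         elif s[i] == 'p' or s[i] == 'q' or s[i] == 'r' or s[i] == 's' or s[i] == 't':
--             logical_vars.append(s[i])
--     return ops1, ops2, logical_vars
-- ===== SOURCE B (Python) =====
-- def process(s):
--     ops1 = [c for c in s if c == 'N']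
--     ops2 = [c for c in s if c in ('K', 'A', 'C', 'E')]
--     logical_vars = [c for c in s if c in ('p', 'q', 'r', 's', 't')]
--     return ops1, ops2, logical_vars
-- ===== Notes on version B (the rewrite author's own statement) =====
-- stated objective: simpler
-- what changed: Replaces the single interleaved categorizing loop with three independent filtering comprehensions over the string, one per output list.
import Mathlib
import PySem

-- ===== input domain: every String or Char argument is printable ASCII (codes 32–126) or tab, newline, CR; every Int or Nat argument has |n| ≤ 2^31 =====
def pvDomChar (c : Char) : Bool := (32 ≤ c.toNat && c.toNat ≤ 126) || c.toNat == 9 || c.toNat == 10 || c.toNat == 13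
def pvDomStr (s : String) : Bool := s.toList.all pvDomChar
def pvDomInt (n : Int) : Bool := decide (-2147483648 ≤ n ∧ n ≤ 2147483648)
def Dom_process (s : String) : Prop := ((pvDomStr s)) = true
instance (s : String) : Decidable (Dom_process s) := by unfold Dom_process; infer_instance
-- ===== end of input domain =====

-- B categorizes via three independent filtering passes instead of A's single interleaved loop; return value only, no side effects.

-- ===== PORT A =====
-- A's single loop over the indices, appending each char (as a 1-char string) to one of three accumulators.
def processLoop (cs : List Char) (ops1 ops2 vars : List String) :
    List String × List String × List String :=
  match cs with
  | [] => (ops1, ops2, vars)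
  | c :: rest =>
    if c = 'N' then processLoop rest (ops1 ++ [String.mk [c]]) ops2 vars
    else if c = 'K' ∨ c = 'A' ∨ c = 'C' ∨ c = 'E' then
      processLoop rest ops1 (ops2 ++ [String.mk [c]]) vars
    else if c = 'p' ∨ c = 'q' ∨ c = 'r' ∨ c = 's' ∨ c = 't' then
      processLoop rest ops1 ops2 (vars ++ [String.mk [c]])
    else processLoop rest ops1 ops2 vars

def process (s : String) : List String × List String × List String :=
  processLoop s.toList [] [] []

-- ===== PORT B =====
-- three independent filters over the string, one per output list
def process_alt (s : String) : List String × List String × List String :=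
  ((s.toList.filter (fun c => c = 'N')).map (fun c => String.mk [c]),
   (s.toList.filter (fun c => c = 'K' ∨ c = 'A' ∨ c = 'C' ∨ c = 'E')).map (fun c => String.mk [c]),
   (s.toList.filter (fun c => c = 'p' ∨ c = 'q' ∨ c = 'r' ∨ c = 's' ∨ c = 't')).map (fun c => String.mk [c]))

-- ===== PRECONDITION & SPEC =====
def Spec_process (s : String) (out : List String × List String × List String) : Prop := out = process_alt s
instance (s : String) (out : List String × List String × List String) : Decidable (Spec_process s out) := by unfold Spec_process; infer_instance

-- ===== CLAIM (what is proved, stated in full; the proofs are below) =====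
def Claim_equal_process : Prop := ∀ (s : String), Dom_process s → Spec_process s (process s)

-- ===== LEMMAS AND PROOFS =====
theorem processLoop_eq (cs : List Char) (o1 o2 v : List String) :
    processLoop cs o1 o2 v =
      (o1 ++ (cs.filter (fun c => c = 'N')).map (fun c => String.mk [c]),
       o2 ++ (cs.filter (fun c => c = 'K' ∨ c = 'A' ∨ c = 'C' ∨ c = 'E')).map (fun c => String.mk [c]),
       v ++ (cs.filter (fun c => c = 'p' ∨ c = 'q' ∨ c = 'r' ∨ c = 's' ∨ c = 't')).map (fun c => String.mk [c])) := by
  induction cs generalizing o1 o2 v with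
  | nil => simp [processLoop]
  | cons c rest ih =>
    by_cases h1 : c = 'N'
    · subst h1; simp [processLoop, ih, List.filter]
    · by_cases h2 : c = 'K' ∨ c = 'A' ∨ c = 'C' ∨ c = 'E'
      · have hn : ¬ (c = 'p' ∨ c = 'q' ∨ c = 'r' ∨ c = 's' ∨ c = 't') := by
          rcases h2 with h | h | h | h <;> subst h <;> decide
        simp [processLoop, h1, h2, hn, ih, List.filter]
      · by_cases h3 : c = 'p' ∨ c = 'q' ∨ c = 'r' ∨ c = 's' ∨ c = 't'
        · simp [processLoop, h1, h2, h3, ih, List.filter]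
        · simp [processLoop, h1, h2, h3, ih, List.filter]

-- ===== VERDICT (by name: the statement is the Claim_ definition above) =====
theorem process_spec : Claim_equal_process := by
  intro s _
  unfold Spec_process process process_alt
  simp [processLoop_eq]
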